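-- pv_equiv track=rewrite | github.com/ChrisCheng816/AutoPercepTest | finetuning.py | _find_last_subsequence_start
-- ===== SOURCE A (Python) =====
-- from typing import List, Dict
--
-- def _find_last_subsequence_start(seq: List[int], subseq: List[int]):
--     if not subseq:
--         return None
--     n = len(seq)
--     m = len(subseq)
--     if m > n:
--         return None
--     last = None
--     for start in range(n):
--         end = start + m
--         if end > n:
--             break
--         if seq[start:end] == subseq:
--             last = start
--     return last
-- ===== SOURCE B (Python) =====
-- def _find_last_subsequence_start(seq, subseq):
--     # Scan the REVERSED sequence left to right for the first occurrence of the
--     # reversed pattern (element-by-element match), then translate the index back: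
--     # the first match in the reversed text is the last match in the original.
--     if not subseq:
--         return None
--     rseq = seq[::-1]
--     rsub = subseq[::-1]
--     n = len(rseq)
--     m = len(rsub)
--     i = 0
--     while i + m <= n:
--         k = 0
--         while k < m and rseq[i + k] == rsub[k]:
--             k += 1
--         if k == m:
--             return n - m - i
--         i += 1
--     return None
-- ===== Notes on version B (the rewrite author's own statement) =====
-- stated objective: alternative
-- what changed: B reverses both lists and scans the reversed text left-to-right for the first occurrence of the reversed pattern with an explicit element-by-element inner match, returning the translated index n-m-i at the first hit, instead of A's left-to-right slice-comparison sweep that keeps overwriting the latest match start.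
import Mathlib
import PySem

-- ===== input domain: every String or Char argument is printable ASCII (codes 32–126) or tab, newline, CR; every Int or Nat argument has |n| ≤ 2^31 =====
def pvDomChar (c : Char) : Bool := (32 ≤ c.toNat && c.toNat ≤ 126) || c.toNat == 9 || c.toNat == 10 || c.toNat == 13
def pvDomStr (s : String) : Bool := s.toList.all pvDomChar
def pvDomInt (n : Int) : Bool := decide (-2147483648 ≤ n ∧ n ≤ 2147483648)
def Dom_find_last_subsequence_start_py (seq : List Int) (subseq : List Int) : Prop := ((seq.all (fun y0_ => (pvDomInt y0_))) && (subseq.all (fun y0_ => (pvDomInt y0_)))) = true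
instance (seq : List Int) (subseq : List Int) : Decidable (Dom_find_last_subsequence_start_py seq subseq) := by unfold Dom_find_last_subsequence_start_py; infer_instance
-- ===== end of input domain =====

-- B reverses both lists and finds the FIRST occurrence of the reversed pattern in the reversed
-- text by an explicit element-by-element inner match, translating the index back (alternative
-- decomposition, same return value everywhere).

-- ===== PORT A =====
-- for start in range(n): end = start + m; if end > n: break; if seq[start:end] == subseq: last = start
def pvLoopA (seq subseq : List Int) (n m : Nat) (start : Nat) (last : Option Int) : Option Int :=
  if start < n then
    if start + m > n then last   -- break
    else
      pvLoopA seq subseq n m (start + 1)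
        (if PySem.List.slice seq (some (start : Int)) (some ((start : Int) + (m : Int))) == subseq
         then some (start : Int) else last)
  else last
termination_by n - start

def find_last_subsequence_start_py (seq : List Int) (subseq : List Int) : Option Int :=
  if subseq = [] then none
  else
    let n := seq.length
    let m := subseq.length
    if m > n then none
    else pvLoopA seq subseq n m 0 none

-- ===== PORT B =====
-- inner: k = 0; while k < m and rseq[i + k] == rsub[k]: k += 1
-- (whenever the element test runs, k < m and i + m ≤ n hold, so both indices are in range
--  and pyGetD's default 0 is never used — exact for Python's rseq[i+k] / rsub[k])
def pvInnerB (rseq rsub : List Int) (m i k : Nat) : Nat :=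
  if h : k < m ∧ PySem.List.pyGetD rseq ((i : Int) + (k : Int)) 0 = PySem.List.pyGetD rsub ((k : Int)) 0
  then pvInnerB rseq rsub m i (k + 1)
  else k
termination_by m - k
decreasing_by omega

-- outer: i = 0; while i + m <= n: … if k == m: return n - m - i; i += 1
def pvOuterB (rseq rsub : List Int) (n m i : Nat) : Option Int :=
  if h : i + m ≤ n then
    if pvInnerB rseq rsub m i 0 = m then some ((n : Int) - (m : Int) - (i : Int))
    else pvOuterB rseq rsub n m (i + 1)
  else none
termination_by n + 1 - i
decreasing_by omega

def find_last_subsequence_start_py_alt (seq : List Int) (subseq : List Int) : Option Int :=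
  if subseq = [] then none
  else
    let rseq := seq.reverse      -- seq[::-1]; exact: PySem.List.slice?_none_none_neg_one
    let rsub := subseq.reverse   -- subseq[::-1]
    pvOuterB rseq rsub rseq.length rsub.length 0

-- ===== PRECONDITION & SPEC =====
def Spec_find_last_subsequence_start_py (seq : List Int) (subseq : List Int) (out : Option Int) : Prop := out = find_last_subsequence_start_py_alt seq subseq
instance (seq : List Int) (subseq : List Int) (out : Option Int) : Decidable (Spec_find_last_subsequence_start_py seq subseq out) := by unfold Spec_find_last_subsequence_start_py; infer_instance

-- ===== CLAIM (what is proved, stated in full; the proofs are below) =====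
def Claim_equal_find_last_subsequence_start_py : Prop := ∀ (seq : List Int) (subseq : List Int), Dom_find_last_subsequence_start_py seq subseq → Spec_find_last_subsequence_start_py seq subseq (find_last_subsequence_start_py seq subseq)

-- ===== LEMMAS AND PROOFS =====

-- proof-side "scan starts downward from s, first hit wins" scanner, phrased with A's slice test
def pvDown (seq subseq : List Int) (m : Nat) : Nat → Option Int
  | 0 => if PySem.List.slice seq (some ((0:Nat) : Int)) (some (((0:Nat) : Int) + (m : Int))) == subseq
         then some (((0:Nat) : Int)) else none
  | s + 1 => if PySem.List.slice seq (some ((s + 1 : Nat) : Int)) (some (((s + 1 : Nat) : Int) + (m : Int))) == subseq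
             then some (((s + 1 : Nat) : Int)) else pvDown seq subseq m s

-- the accumulator A carries at position `start` equals the downward scan over starts < `start`
def pvPre (seq subseq : List Int) (m : Nat) : Nat → Option Int
  | 0 => none
  | s + 1 => pvDown seq subseq m s

lemma pvDown_succ (seq subseq : List Int) (m s : Nat) :
    pvDown seq subseq m s =
      (if PySem.List.slice seq (some (s : Int)) (some ((s : Int) + (m : Int))) == subseq
       then some (s : Int) else pvPre seq subseq m s) := by
  cases s <;> rfl

lemma pvBeqDecide (a b : List Int) : (a == b) = decide (a = b) := by
  by_cases h : a = b <;> simp [h]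

lemma pvLoopA_stop (seq subseq : List Int) (n m start : Nat) (last : Option Int)
    (h : start + m > n ∨ ¬ start < n) :
    pvLoopA seq subseq n m start last = last := by
  rw [pvLoopA]
  rcases h with h | h
  · simp [h]
  · simp [h]

lemma pvMainA (seq subseq : List Int) (n m k : Nat) (hm : 0 < m) (hk : k + m = n) :
    ∀ d start, start + d = k + 1 →
      pvLoopA seq subseq n m start (pvPre seq subseq m start) = pvDown seq subseq m k := by
  intro d
  induction d with
  | zero =>
      intro start h
      have hs : start = k + 1 := by omega
      subst hs
      rw [pvLoopA_stop seq subseq n m (k+1) _ (Or.inl (by omega))]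
      rfl
  | succ d ih =>
      intro start h
      have hlt : start < n := by omega
      have hle : ¬ start + m > n := by omega
      rw [pvLoopA]
      simp only [hlt, if_pos, hle, if_false]
      rw [← pvDown_succ]
      exact ih (start + 1) (by omega)

-- the inner while loop reaches m exactly when the m elements starting at i all agree
lemma pvInner_iff (rseq rsub : List Int) (m i : Nat) :
    ∀ k, k ≤ m → (pvInnerB rseq rsub m i k = m ↔
      ∀ j, k ≤ j → j < m → rseq.getD (i + j) 0 = rsub.getD j 0) := by
  intro k hk
  induction hd : m - k generalizing k with
  | zero =>
      have : k = m := by omega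
      subst this
      rw [pvInnerB]
      simp only [lt_irrefl, false_and, dite_false]
      constructor
      · intro _ j hj1 hj2; omega
      · intro _; trivial
  | succ d ih =>
      have hkm : k < m := by omega
      rw [pvInnerB]
      have hcast : ((i : Int) + (k : Int)) = ((i + k : Nat) : Int) := by push_cast; ring
      by_cases he : rseq.getD (i + k) 0 = rsub.getD k 0
      · have : (k < m ∧ PySem.List.pyGetD rseq ((i : Int) + (k : Int)) 0 =
            PySem.List.pyGetD rsub ((k : Int)) 0) := by
          refine ⟨hkm, ?_⟩
          rw [hcast, PySem.List.pyGetD_natCast, PySem.List.pyGetD_natCast]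
          exact he
        rw [dif_pos this]
        rw [ih (k + 1) (by omega) (by omega)]
        constructor
        · intro hall j hj1 hj2
          rcases Nat.eq_or_lt_of_le hj1 with rfl | hlt
          · exact he
          · exact hall j hlt hj2
        · intro hall j hj1 hj2
          exact hall j (by omega) hj2
      · have : ¬ (k < m ∧ PySem.List.pyGetD rseq ((i : Int) + (k : Int)) 0 =
            PySem.List.pyGetD rsub ((k : Int)) 0) := by
          intro ⟨_, hc⟩
          apply he
          rw [hcast, PySem.List.pyGetD_natCast, PySem.List.pyGetD_natCast] at hc
          exact hc
        rw [dif_neg this]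
        constructor
        · intro hkm'; omega
        · intro hall; exact absurd (hall k (le_refl k) hkm) he

lemma pvInner_eq_take (rseq rsub : List Int) (m i : Nat)
    (hm : rsub.length = m) (hin : i + m ≤ rseq.length) :
    pvInnerB rseq rsub m i 0 = m ↔ (rseq.drop i).take m = rsub := by
  rw [pvInner_iff rseq rsub m i 0 (Nat.zero_le m)]
  constructor
  · intro hall
    apply List.ext_getElem
    · simp [hm]; omega
    · intro j hj1 hj2
      have hjm : j < m := by simpa [hm] using hj2
      have := hall j (Nat.zero_le j) hjm
      rw [List.getD_eq_getElem rseq 0 (by omega), List.getD_eq_getElem rsub 0 (by omega)] at this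
      simpa [List.getElem_take, List.getElem_drop] using this
  · intro heq j _ hjm
    have hj2 : j < ((rseq.drop i).take m).length := by simp; omega
    have := List.getElem_of_eq heq hj2
    rw [List.getD_eq_getElem rseq 0 (by omega), List.getD_eq_getElem rsub 0 (by omega)]
    simpa [List.getElem_take, List.getElem_drop] using this

-- index translation: the window at i in the reversed text is the reversed window at n-m-i
lemma pvRev_window (seq : List Int) (n m s : Nat) (hn : seq.length = n) (hs : s + m ≤ n) :
    (seq.reverse.drop (n - m - s)).take m = ((seq.drop s).take m).reverse := by
  subst hn
  rw [List.drop_reverse, show seq.length - (seq.length - m - s) = s + m by omega]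
  rw [List.take_reverse]
  have h2 : (seq.take (s + m)).length = s + m := by simp; omega
  rw [h2, show s + m - m = s by omega, List.drop_take, show s + m - s = m by omega]

-- B's outer loop from i equals the downward scan from n-m-i
lemma pvOuter_down (seq subseq : List Int) (n m : Nat)
    (hn : seq.length = n) (hm : subseq.length = m) (hmn : m ≤ n) :
    ∀ s i, i + s = n - m → pvOuterB seq.reverse subseq.reverse n m i = pvDown seq subseq m s := by
  intro s
  induction s with
  | zero =>
      intro i hi
      have hieq : i = n - m := by omega
      subst hieq
      rw [pvOuterB, dif_pos (by omega)]
      have hwin : pvInnerB seq.reverse subseq.reverse m (n - m) 0 = m ↔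
          (seq.drop 0).take m = subseq := by
        rw [pvInner_eq_take seq.reverse subseq.reverse m (n - m) (by simp [hm]) (by simp [hn]; omega)]
        have := pvRev_window seq n m 0 hn (by omega)
        simp only [Nat.sub_zero] at this
        rw [this]
        exact List.reverse_inj
      have hslice : (PySem.List.slice seq (some ((0:Nat) : Int)) (some (((0:Nat) : Int) + (m : Int))) == subseq) = decide ((seq.drop 0).take m = subseq) := by
        rw [PySem.List.slice_natCast_add]
        exact pvBeqDecide _ _
      rw [pvDown]
      rw [hslice]
      by_cases hc : (seq.drop 0).take m = subseq
      · rw [if_pos (hwin.mpr hc), if_pos (by simpa using hc)]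
        congr 1
        push_cast
        omega
      · rw [if_neg (fun h => hc (hwin.mp h)), if_neg (by simpa using hc)]
        rw [pvOuterB, dif_neg (by omega)]
  | succ t ih =>
      intro i hi
      rw [pvOuterB, dif_pos (by omega)]
      have hwin : pvInnerB seq.reverse subseq.reverse m i 0 = m ↔
          (seq.drop (t + 1)).take m = subseq := by
        rw [pvInner_eq_take seq.reverse subseq.reverse m i (by simp [hm]) (by simp [hn]; omega)]
        have hidx : n - m - (t + 1) = i := by omega
        have := pvRev_window seq n m (t + 1) hn (by omega)
        rw [hidx] at this
        rw [this]
        exact List.reverse_inj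
      have hslice : (PySem.List.slice seq (some ((t + 1 : Nat) : Int)) (some (((t + 1 : Nat) : Int) + (m : Int))) == subseq) = decide ((seq.drop (t + 1)).take m = subseq) := by
        rw [PySem.List.slice_natCast_add]
        exact pvBeqDecide _ _
      rw [pvDown]
      rw [hslice]
      by_cases hc : (seq.drop (t + 1)).take m = subseq
      · rw [if_pos (hwin.mpr hc), if_pos (by simpa using hc)]
        congr 1
        push_cast
        omega
      · rw [if_neg (fun h => hc (hwin.mp h)), if_neg (by simpa using hc)]
        exact ih (i + 1) (by omega)

-- ===== VERDICT (by name: the statement is the Claim_ definition above) =====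
theorem find_last_subsequence_start_py_spec : Claim_equal_find_last_subsequence_start_py := by
  intro seq subseq _
  unfold Spec_find_last_subsequence_start_py find_last_subsequence_start_py find_last_subsequence_start_py_alt
  by_cases hnil : subseq = []
  · simp [hnil]
  · simp only [hnil, if_false]
    have hm : 0 < subseq.length := List.length_pos_of_ne_nil hnil
    by_cases hmn : subseq.length > seq.length
    · simp only [hmn, if_pos]
      rw [pvOuterB, dif_neg (by simp; omega)]
    · simp only [hmn, if_false]
      have hA := pvMainA seq subseq seq.length subseq.length (seq.length - subseq.length) hm
        (by omega) (seq.length - subseq.length + 1) 0 (by omega)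
      have hB := pvOuter_down seq subseq seq.length subseq.length rfl rfl (by omega)
        (seq.length - subseq.length) 0 (by omega)
      simp only [List.length_reverse]
      rw [hB]
      simpa [pvPre] using hA
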